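-- pv_equiv track=rewrite | github.com/apstenku123/nanochat | scripts/data/generate_tool_sft.py | build_path_index
-- ===== SOURCE A (Python) =====
-- def build_path_index(records: list[dict]) -> dict[str, list[int]]:
--     """Build index from directory prefix to record indices for related search."""
--     idx = {}
--     for i, r in enumerate(records):
--         path = r.get("path", "")
--         # Use top 2 directory components as key
--         parts = path.split("/")
--         if len(parts) >= 2:
--             key = "/".join(parts[:2])
--         else:
--             key = parts[0] if parts else ""
--         idx.setdefault(key, []).append(i)
--     return idx
-- ===== SOURCE B (Python) =====
-- def build_path_index(records: list[dict]) -> dict[str, list[int]]: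
--     """Build index from directory prefix to record indices for related search."""
--     # One uniform key rule: "/".join of the first <=2 split components
--     # (split never returns an empty list, so this matches the 0/1/2+ branching).
--     keys = ["/".join(r.get("path", "").split("/")[:2]) for r in records]
--     return {k: [i for i, kk in enumerate(keys) if kk == k]
--             for k in dict.fromkeys(keys)}
-- ===== Notes on version B (the rewrite author's own statement) =====
-- stated objective: alternative
-- what changed: B replaces A's single-pass setdefault-accumulating dict with a two-phase decomposition: materialize the list of keys (using one uniform '/'.join(parts[:2]) rule instead of A's 0/1/2+ branching), dedupe it in first-occurrence order with dict.fromkeys, and build each key's index list by a comprehension over enumerate(keys).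
import Mathlib
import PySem

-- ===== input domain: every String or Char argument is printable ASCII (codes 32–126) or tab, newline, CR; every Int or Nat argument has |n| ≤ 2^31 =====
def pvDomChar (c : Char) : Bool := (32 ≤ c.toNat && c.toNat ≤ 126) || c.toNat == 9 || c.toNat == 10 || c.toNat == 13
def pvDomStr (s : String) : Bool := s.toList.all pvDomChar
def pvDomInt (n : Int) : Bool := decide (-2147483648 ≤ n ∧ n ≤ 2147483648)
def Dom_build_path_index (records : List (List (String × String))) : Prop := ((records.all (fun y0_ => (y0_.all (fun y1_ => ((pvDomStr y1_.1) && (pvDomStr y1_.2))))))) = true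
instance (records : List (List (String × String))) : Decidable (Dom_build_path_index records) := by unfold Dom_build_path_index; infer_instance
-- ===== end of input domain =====

-- B replaces A's incremental setdefault-accumulation by a materialize-keys, then
-- per-distinct-key comprehension decomposition (alternative; same results, same order).
-- ===== PORT A =====
-- literal transliteration: enumerate + setdefault(key, []).append(i) as Dict.modify; returns the dict's items
def build_path_index (records : List (List (String × String))) : List (String × List Int) :=
  let idx : PySem.Dict String (List Int) :=
    (PySem.List.enumerate records 0).foldl
      (fun idx p =>
        let path := (PySem.Dict.mk p.2).getD "path" ""
        let parts := (PySem.Str.split? path "/").getD []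
        let key :=
          if parts.length ≥ 2 then
            PySem.Str.join "/" (PySem.List.slice parts none (some 2))
          else
            match parts with
            | [] => ""
            | x :: _ => x
        idx.modify key [] (· ++ [p.1]))
      PySem.Dict.empty
  idx.items

-- ===== PORT B =====
-- B's uniform key rule: "/".join(path.split("/")[:2])
def pvKeyOf (r : List (String × String)) : String :=
  PySem.Str.join "/" (PySem.List.slice ((PySem.Str.split? ((PySem.Dict.mk r).getD "path" "") "/").getD []) none (some 2))

-- literal transliteration of Source B: materialize keys, then per distinct key (dict.fromkeys order
-- = PySem.Set.ofList) the comprehension over enumerate(keys)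
def build_path_index_alt (records : List (List (String × String))) : List (String × List Int) :=
  let keys := records.map pvKeyOf
  (PySem.Set.ofList keys).map
    (fun k => (k, ((PySem.List.enumerate keys 0).filter (fun p => p.2 == k)).map (·.1)))

-- ===== PRECONDITION & SPEC =====
def Spec_build_path_index (records : List (List (String × String))) (out : List (String × List Int)) : Prop := out = build_path_index_alt records
instance (records : List (List (String × String))) (out : List (String × List Int)) : Decidable (Spec_build_path_index records out) := by unfold Spec_build_path_index; infer_instance

-- ===== CLAIM (what is proved, stated in full; the proofs are below) =====
def Claim_equal_build_path_index : Prop := ∀ (records : List (List (String × String))), Dom_build_path_index records → Spec_build_path_index records (build_path_index records)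

-- ===== LEMMAS AND PROOFS =====

theorem pv_key_branch_eq (parts : List String) :
    (if parts.length ≥ 2 then PySem.Str.join "/" (PySem.List.slice parts none (some 2))
     else match parts with | [] => "" | x :: _ => x)
    = PySem.Str.join "/" (PySem.List.slice parts none (some 2)) := by
  rw [PySem.List.slice_to parts (by norm_num : (0:Int) ≤ 2)]
  match parts with
  | [] => simp [PySem.Str.join]
  | [x] => simp [PySem.Str.join]
  | x :: y :: t => simp

theorem pv_foldA (records : List (List (String × String))) :
    (PySem.List.enumerate records 0).foldl
      (fun idx p =>
        let path := (PySem.Dict.mk p.2).getD "path" ""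
        let parts := (PySem.Str.split? path "/").getD []
        let key :=
          if parts.length ≥ 2 then
            PySem.Str.join "/" (PySem.List.slice parts none (some 2))
          else
            match parts with | [] => "" | x :: _ => x
        idx.modify key [] (· ++ [p.1]))
      PySem.Dict.empty
    = ((PySem.List.enumerate records 0).map (fun p => (pvKeyOf p.2, p.1))).foldl
        (fun d q => d.modify q.1 [] (· ++ [q.2])) PySem.Dict.empty := by
  rw [List.foldl_map]
  have hfun : (fun (idx : PySem.Dict String (List Int)) (p : Int × List (String × String)) =>
        let path := (PySem.Dict.mk p.2).getD "path" ""
        let parts := (PySem.Str.split? path "/").getD []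
        let key :=
          if parts.length ≥ 2 then
            PySem.Str.join "/" (PySem.List.slice parts none (some 2))
          else
            match parts with | [] => "" | x :: _ => x
        idx.modify key [] (· ++ [p.1]))
      = (fun idx p => idx.modify (pvKeyOf p.2) [] (· ++ [p.1])) := by
    funext idx p
    simp only [pv_key_branch_eq, pvKeyOf]
  rw [hfun]


theorem pv_enumerate_map {α β : Type} (f : α → β) (xs : List α) (s : Int) :
    PySem.List.enumerate (xs.map f) s
      = (PySem.List.enumerate xs s).map (fun p => (p.1, f p.2)) := by
  induction xs generalizing s with
  | nil => rfl
  | cons x xs ih => simp [PySem.List.enumerate_cons, ih]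

theorem pv_main (records : List (List (String × String))) :
    (((PySem.List.enumerate records 0).map (fun p => (pvKeyOf p.2, p.1))).foldl
        (fun d q => d.modify q.1 [] (· ++ [q.2])) PySem.Dict.empty).items
    = build_path_index_alt records := by
  set l := (PySem.List.enumerate records 0).map (fun p => (pvKeyOf p.2, p.1)) with hl
  have hnd : ((l.foldl (fun d q => d.modify q.1 [] (· ++ [q.2])) PySem.Dict.empty)).keys.Nodup :=
    PySem.Dict.nodup_keys_foldl_modify_key l Prod.fst [] (fun _ q => (· ++ [q.2]))
      PySem.Dict.empty (by simp)
  rw [PySem.Dict.items_eq_map_keys _ hnd []]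
  rw [PySem.Dict.keys_foldl_modify_key l Prod.fst [] (fun _ q => (· ++ [q.2])) PySem.Dict.empty]
  have hkeys : l.map Prod.fst = records.map pvKeyOf := by
    rw [hl, List.map_map]
    rw [show ((Prod.fst ∘ fun p => (pvKeyOf p.2, p.1)) : Int × List (String × String) → String)
          = pvKeyOf ∘ Prod.snd from rfl,
        ← List.map_map, PySem.List.map_snd_enumerate]
  rw [PySem.Dict.keys_empty, PySem.Set.update_nil_left, hkeys]
  show _ = (PySem.Set.ofList (records.map pvKeyOf)).map _
  apply List.map_congr_left
  intro k _
  congr 1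
  rw [PySem.Dict.getD_foldl_modify_append, PySem.Dict.getD_empty, List.nil_append]
  rw [pv_enumerate_map, hl]
  simp [List.filter_map, List.map_map, Function.comp_def]

-- ===== VERDICT (by name: the statement is the Claim_ definition above) =====
theorem build_path_index_spec : Claim_equal_build_path_index := by
  intro records _
  unfold Spec_build_path_index build_path_index
  rw [pv_foldA]
  exact pv_main records
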